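-- pv_equiv track=rewrite | github.com/Allegris/TR-project-F2022 | skew.py | bucket_sort_first_char
-- ===== SOURCE A (Python) =====
-- SENTINEL = 0
--
-- def safe_string_idx(x, index):
-- 	if index >= len(x):
-- 		return SENTINEL
-- 	else:
-- 		return x[index]
--
-- def bucket_sort_first_char(x, suffix_indices, alpha_size):
-- 	buckets = [[]]
-- 	buckets += [[] for i in range(alpha_size)]
-- 	for idx in suffix_indices:
-- 		char = safe_string_idx(x, idx)
-- 		buckets[char].append(idx)
-- 	combined_buckets = [item for sublist in buckets for item in sublist]
-- 	return combined_buckets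
-- ===== SOURCE B (Python) =====
-- SENTINEL = 0
--
--
-- def safe_string_idx(x, index):
-- 	if index >= len(x):
-- 		return SENTINEL
-- 	else:
-- 		return x[index]
--
--
-- def bucket_sort_first_char(x, suffix_indices, alpha_size):
-- 	# Counting sort with prefix sums: count each class, turn counts into
-- 	# starting offsets, then place every index at its offset in one pass.
-- 	counts = [0] * (alpha_size + 1)
-- 	for idx in suffix_indices:
-- 		counts[safe_string_idx(x, idx)] += 1
-- 	offsets = []
-- 	total = 0
-- 	for c in counts:
-- 		offsets.append(total)
-- 		total += c
-- 	out = [0] * total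
-- 	for idx in suffix_indices:
-- 		char = safe_string_idx(x, idx)
-- 		out[offsets[char]] = idx
-- 		offsets[char] += 1
-- 	return out
-- ===== Notes on version B (the rewrite author's own statement) =====
-- stated objective: alternative
-- what changed: Replaces A's distribution into alpha_size+1 bucket lists (then flattened) by an array counting sort: one pass counts each class, a cumulative-sum pass turns counts into starting offsets, and a final pass writes every index directly into its slot of a preallocated flat output array. Pre_ excludes the inputs where A raises IndexError, and the degenerate alpha_size < 0 with nonempty suffix_indices, where A's '[[]] + [[] for i in range(alpha_size)]' accidentally keeps one bucket and returns while B's counting sort raises IndexError on its empty counts array.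
-- outside the precondition, e.g. on bucket_sort_first_char([], [5], -1): A returns [5], B raises IndexError; on bucket_sort_first_char([0, 0], [0, 1], -2): A returns [0, 1], B raises IndexError
import Mathlib
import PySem

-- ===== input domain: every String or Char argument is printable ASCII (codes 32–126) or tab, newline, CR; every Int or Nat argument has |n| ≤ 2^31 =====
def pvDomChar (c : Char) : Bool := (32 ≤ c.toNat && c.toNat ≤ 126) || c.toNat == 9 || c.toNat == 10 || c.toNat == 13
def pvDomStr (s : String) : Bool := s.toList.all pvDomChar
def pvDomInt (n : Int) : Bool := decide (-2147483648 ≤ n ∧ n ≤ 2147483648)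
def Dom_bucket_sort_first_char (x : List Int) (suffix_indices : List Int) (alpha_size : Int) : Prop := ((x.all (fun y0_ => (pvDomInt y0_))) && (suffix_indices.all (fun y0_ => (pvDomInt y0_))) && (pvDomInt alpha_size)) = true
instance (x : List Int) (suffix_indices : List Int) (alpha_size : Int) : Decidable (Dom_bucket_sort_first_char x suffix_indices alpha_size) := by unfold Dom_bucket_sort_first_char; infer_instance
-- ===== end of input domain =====

-- B replaces A's distribution into alpha_size+1 bucket lists by a counting sort with prefix
-- sums (count the classes, turn counts into starting offsets, place each index in one pass);
-- objective: alternative algorithm of the same cost.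

-- ===== PORT A =====
def SENTINEL : Int := 0

-- returns none where Python's x[index] raises IndexError (excluded by Pre_)
def safe_string_idx (x : List Int) (index : Int) : Option Int :=
  if index ≥ (x.length : Int) then some SENTINEL
  else PySem.List.pyGet? x index

def bucket_sort_first_char (x : List Int) (suffix_indices : List Int) (alpha_size : Int) : List Int :=
  let buckets : List (List Int) :=
    [([] : List Int)] ++ (PySem.List.pyRange 0 alpha_size 1).map (fun _ => ([] : List Int))
  let final := suffix_indices.foldl (fun b idx =>
    match safe_string_idx x idx with
    | none => b          -- IndexError in Python; outside Pre_
    | some char =>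
      match PySem.List.pyGet? b char with
      | none => b        -- IndexError (char out of bucket range) in Python; outside Pre_
      | some bl => (PySem.List.pySet? b char (bl ++ [idx])).getD b) buckets
  final.flatten

-- ===== PORT B =====
def bucket_sort_first_char_alt (x : List Int) (suffix_indices : List Int) (alpha_size : Int) : List Int :=
  let counts := suffix_indices.foldl (fun cnts idx =>
    match safe_string_idx x idx with
    | none => cnts       -- IndexError in Python; outside Pre_
    | some ch =>
      match PySem.List.pyGet? cnts ch with
      | none => cnts     -- IndexError (char out of counts range) in Python; outside Pre_
      | some v => (PySem.List.pySet? cnts ch (v + 1)).getD cnts)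
    (PySem.List.pyRepeat [(0 : Int)] (alpha_size + 1))
  let ot := counts.foldl (fun (p : List Int × Int) c => (p.1 ++ [p.2], p.2 + c)) (([] : List Int), (0 : Int))
  let res := suffix_indices.foldl (fun (st : List Int × List Int) idx =>
    match safe_string_idx x idx with
    | none => st         -- IndexError in Python; outside Pre_
    | some ch =>
      match PySem.List.pyGet? st.2 ch with
      | none => st       -- IndexError in Python; outside Pre_
      | some off =>
        ((PySem.List.pySet? st.1 off idx).getD st.1,
         (PySem.List.pySet? st.2 ch (off + 1)).getD st.2))
    (PySem.List.pyRepeat [(0 : Int)] ot.2, ot.1)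
  res.1

-- ===== PRECONDITION & SPEC =====
-- Pre_ excludes (a) the inputs where Python A raises IndexError (a suffix index below -len(x),
-- or a looked-up character code outside the bucket list's index range), and (b) the degenerate
-- corner alpha_size < 0 with nonempty suffix_indices, where A still returns (its '[[]] +
-- [[] for i in range(alpha_size)]' quietly keeps one bucket) while B's counting sort raises
-- IndexError on its empty counts array.
def Pre_bucket_sort_first_char (x : List Int) (suffix_indices : List Int) (alpha_size : Int) : Prop :=
  ((decide (0 ≤ alpha_size) || suffix_indices.isEmpty) &&
   suffix_indices.all (fun idx =>
     decide (idx ≥ (x.length : Int)) ||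
     (match PySem.List.pyGet? x idx with
      | some c => decide (-(alpha_size + 1) ≤ c ∧ c < alpha_size + 1)
      | none => false))) = true

instance (x : List Int) (suffix_indices : List Int) (alpha_size : Int) : Decidable (Pre_bucket_sort_first_char x suffix_indices alpha_size) := by unfold Pre_bucket_sort_first_char; infer_instance

def pvWitness_bucket_sort_first_char : List Int × List Int × Int := ([1, 0, 1], [0, 1, 2, 3], 2)

def Spec_bucket_sort_first_char (x : List Int) (suffix_indices : List Int) (alpha_size : Int) (out : List Int) : Prop := out = bucket_sort_first_char_alt x suffix_indices alpha_size
instance (x : List Int) (suffix_indices : List Int) (alpha_size : Int) (out : List Int) : Decidable (Spec_bucket_sort_first_char x suffix_indices alpha_size out) := by unfold Spec_bucket_sort_first_char; infer_instance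

-- ===== CLAIM (what is proved, stated in full; the proofs are below) =====
def Claim_equal_bucket_sort_first_char : Prop := ∀ (x : List Int) (suffix_indices : List Int) (alpha_size : Int), Dom_bucket_sort_first_char x suffix_indices alpha_size → Pre_bucket_sort_first_char x suffix_indices alpha_size → Spec_bucket_sort_first_char x suffix_indices alpha_size (bucket_sort_first_char x suffix_indices alpha_size)

-- ===== LEMMAS AND PROOFS =====

-- number of bucket classes, its positivity, the looked-up character, its class index,
-- the class predicate, the per-class sublists and their prefix sums
def pvL (alpha_size : Int) : Int := 1 + max alpha_size 0

def pvChar (x : List Int) (idx : Int) : Int := (safe_string_idx x idx).getD 0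

def pvCls (x : List Int) (alpha_size idx : Int) : Int :=
  PySem.Int.mod (pvChar x idx) (pvL alpha_size)

def pvGood (x : List Int) (alpha_size idx : Int) : Prop :=
  safe_string_idx x idx = some (pvChar x idx) ∧
    -(pvL alpha_size) ≤ pvChar x idx ∧ pvChar x idx < pvL alpha_size

def pvP (x : List Int) (alpha_size : Int) (j : Nat) : Int → Bool :=
  fun i => pvCls x alpha_size i == (j : Int)

def pvF (x : List Int) (alpha_size : Int) (s : List Int) (j : Nat) : List Int :=
  s.filter (pvP x alpha_size j)

def pvNB (x : List Int) (alpha_size : Int) (s : List Int) (m : Nat) : Nat :=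
  ((List.range m).map (fun j => (pvF x alpha_size s j).length)).sum

theorem pvL_pos (alpha_size : Int) : 0 < pvL alpha_size := by
  have := le_max_right alpha_size (0 : Int); unfold pvL; omega

theorem pvGood_of_pre {x suffix_indices : List Int} {alpha_size : Int}
    (hα : 0 ≤ alpha_size)
    (h : Pre_bucket_sort_first_char x suffix_indices alpha_size)
    {idx : Int} (hm : idx ∈ suffix_indices) : pvGood x alpha_size idx := by
  unfold Pre_bucket_sort_first_char at h
  rw [Bool.and_eq_true, List.all_eq_true] at h
  have h2 := h.2 idx hm
  have hL : pvL alpha_size = alpha_size + 1 := by unfold pvL; omega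
  by_cases hge : idx ≥ (x.length : Int)
  · have hsafe : safe_string_idx x idx = some 0 := by
      simp [safe_string_idx, SENTINEL, hge]
    refine ⟨by simp [pvChar, hsafe], ?_, ?_⟩ <;> simp [pvChar, hsafe, hL] <;> omega
  · simp only [hge, decide_false, Bool.false_or] at h2
    cases hq : PySem.List.pyGet? x idx with
    | none => rw [hq] at h2; simp at h2
    | some c =>
      rw [hq] at h2
      have hsafe : safe_string_idx x idx = some c := by
        simp [safe_string_idx, hge, hq]
      have hc : pvChar x idx = c := by simp [pvChar, hsafe]
      simp only [decide_eq_true_eq] at h2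
      exact ⟨by rw [hsafe, hc], by rw [hc, hL]; omega, by rw [hc, hL]; omega⟩

theorem pvCls_nonneg (x : List Int) (alpha_size idx : Int) : 0 ≤ pvCls x alpha_size idx :=
  PySem.Int.mod_nonneg _ (pvL_pos alpha_size)

theorem pvCls_lt (x : List Int) (alpha_size idx : Int) : pvCls x alpha_size idx < pvL alpha_size :=
  PySem.Int.mod_lt _ (pvL_pos alpha_size)

-- the normalized index Python's negative-index rule assigns to the looked-up character
theorem pvIdx_eq {x : List Int} {alpha_size idx : Int} {n : Nat}
    (hn : n = (pvL alpha_size).toNat) (hg : pvGood x alpha_size idx) :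
    PySem.List.pyIdx? n (pvChar x idx) = some (pvCls x alpha_size idx).toNat := by
  obtain ⟨hs, h1, h2⟩ := hg
  have hL := pvL_pos alpha_size
  have hmod : pvCls x alpha_size idx = (pvChar x idx) % (pvL alpha_size) := by
    unfold pvCls; exact PySem.Int.mod_eq_emod_of_pos hL
  have hLc : (((pvL alpha_size).toNat : Nat) : Int) = pvL alpha_size := by omega
  simp only [PySem.List.pyIdx?, hn, hmod, hLc]
  by_cases hc1 : (0 : Int) ≤ pvChar x idx
  · rw [if_pos hc1, if_pos (show pvChar x idx < pvL alpha_size by omega)]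
    rw [Int.emod_eq_of_lt hc1 (by omega)]
  · rw [if_neg hc1, if_pos (show -(pvL alpha_size) ≤ pvChar x idx by omega)]
    have h5 : pvChar x idx % pvL alpha_size = pvChar x idx + pvL alpha_size := by
      have h7 : (pvChar x idx + pvL alpha_size) % pvL alpha_size
          = pvChar x idx + pvL alpha_size := Int.emod_eq_of_lt (by omega) (by omega)
      have h6 : (pvChar x idx + pvL alpha_size) % pvL alpha_size
          = pvChar x idx % pvL alpha_size := by
        rw [show pvChar x idx + pvL alpha_size
            = pvChar x idx + pvL alpha_size * 1 by ring, Int.add_mul_emod_self_left]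
      omega
    rw [h5]
    simp only [Option.some.injEq]
    omega

-- A's loop body, under Pre_, is a set at the normalized class index
theorem pvStepA {x : List Int} {alpha_size idx : Int} (b : List (List Int))
    (hg : pvGood x alpha_size idx) (hb : b.length = (pvL alpha_size).toNat) :
    (match safe_string_idx x idx with
     | none => b
     | some char =>
       match PySem.List.pyGet? b char with
       | none => b
       | some bl => (PySem.List.pySet? b char (bl ++ [idx])).getD b)
    = b.set (pvCls x alpha_size idx).toNat
        (b.getD (pvCls x alpha_size idx).toNat [] ++ [idx]) := by
  have hidx : PySem.List.pyIdx? b.length (pvChar x idx)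
      = some (pvCls x alpha_size idx).toNat := pvIdx_eq hb hg
  have hcls1 := pvCls_nonneg x alpha_size idx
  have hcls2 := pvCls_lt x alpha_size idx
  have hlt : (pvCls x alpha_size idx).toNat < b.length := by
    have := pvL_pos alpha_size; omega
  rw [hg.1]
  simp only [PySem.List.pyGet?, PySem.List.pySet?, hidx, Option.bind_some, Option.map_some,
    Option.getD_some, List.getElem?_eq_getElem hlt, List.getD_eq_getElem?_getD]

-- B's count-loop body, under Pre_, is a set (+1) at the normalized class index
theorem pvStepCnt {x : List Int} {alpha_size idx : Int} (cnts : List Int)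
    (hg : pvGood x alpha_size idx) (hb : cnts.length = (pvL alpha_size).toNat) :
    (match safe_string_idx x idx with
     | none => cnts
     | some ch =>
       match PySem.List.pyGet? cnts ch with
       | none => cnts
       | some v => (PySem.List.pySet? cnts ch (v + 1)).getD cnts)
    = cnts.set (pvCls x alpha_size idx).toNat
        (cnts.getD (pvCls x alpha_size idx).toNat 0 + 1) := by
  have hidx : PySem.List.pyIdx? cnts.length (pvChar x idx)
      = some (pvCls x alpha_size idx).toNat := pvIdx_eq hb hg
  have hcls1 := pvCls_nonneg x alpha_size idx
  have hcls2 := pvCls_lt x alpha_size idx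
  have hlt : (pvCls x alpha_size idx).toNat < cnts.length := by
    have := pvL_pos alpha_size; omega
  rw [hg.1]
  simp only [PySem.List.pyGet?, PySem.List.pySet?, hidx, Option.bind_some, Option.map_some,
    Option.getD_some, List.getElem?_eq_getElem hlt, List.getD_eq_getElem?_getD]

-- invariant of A's distribution loop
theorem pvFoldA {x : List Int} {alpha_size : Int} (l : List Int)
    (hgood : ∀ i ∈ l, pvGood x alpha_size i) :
    ∀ b : List (List Int), b.length = (pvL alpha_size).toNat →
      (l.foldl (fun b idx =>
        (match safe_string_idx x idx with
         | none => b
         | some char =>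
           match PySem.List.pyGet? b char with
           | none => b
           | some bl => (PySem.List.pySet? b char (bl ++ [idx])).getD b)) b).length
        = (pvL alpha_size).toNat ∧
      ∀ j : Nat, j < (pvL alpha_size).toNat →
        (l.foldl (fun b idx =>
          (match safe_string_idx x idx with
           | none => b
           | some char =>
             match PySem.List.pyGet? b char with
             | none => b
             | some bl => (PySem.List.pySet? b char (bl ++ [idx])).getD b)) b).getD j []
          = b.getD j [] ++ l.filter (pvP x alpha_size j) := by
  induction l with
  | nil => intro b hb; simp [hb]
  | cons i l ih =>
    intro b hb
    have hgi : pvGood x alpha_size i := hgood i (List.mem_cons_self)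
    have hgl : ∀ i ∈ l, pvGood x alpha_size i := fun i hi => hgood i (List.mem_cons_of_mem _ hi)
    have hstep := pvStepA b hgi hb
    set j0 := (pvCls x alpha_size i).toNat with hj0
    have hj0lt : j0 < (pvL alpha_size).toNat := by
      have := pvCls_lt x alpha_size i
      have := pvCls_nonneg x alpha_size i
      omega
    have hb' : (b.set j0 (b.getD j0 [] ++ [i])).length = (pvL alpha_size).toNat := by
      simp [hb]
    obtain ⟨ihlen, ihget⟩ := ih hgl (b.set j0 (b.getD j0 [] ++ [i])) hb'
    simp only [List.foldl_cons, hstep]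
    refine ⟨ihlen, ?_⟩
    intro j hj
    rw [ihget j hj]
    have hgd : (b.set j0 (b.getD j0 [] ++ [i])).getD j []
        = if j0 = j then b.getD j0 [] ++ [i] else b.getD j [] := by
      simp only [List.getD_eq_getElem?_getD, List.getElem?_set]
      rcases eq_or_ne j0 j with he | he
      · subst he; rw [if_pos rfl, if_pos rfl, if_pos (by omega)]; simp
      · rw [if_neg he, if_neg he]
    rw [hgd]
    by_cases he : j0 = j
    · subst he
      have hcl : pvP x alpha_size j0 i = true := by
        have := pvCls_nonneg x alpha_size i
        simp only [pvP, beq_iff_eq]; omega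
      simp [hcl]
    · have hcl : pvP x alpha_size j i = false := by
        have := pvCls_nonneg x alpha_size i
        simp only [pvP, beq_eq_false_iff_ne, ne_eq]
        intro hc; apply he; omega
      simp [hcl, he]

-- invariant of B's counting loop
theorem pvFoldCnt {x : List Int} {alpha_size : Int} (l : List Int)
    (hgood : ∀ i ∈ l, pvGood x alpha_size i) :
    ∀ cnts : List Int, cnts.length = (pvL alpha_size).toNat →
      (l.foldl (fun cnts idx =>
        (match safe_string_idx x idx with
         | none => cnts
         | some ch =>
           match PySem.List.pyGet? cnts ch with
           | none => cnts
           | some v => (PySem.List.pySet? cnts ch (v + 1)).getD cnts)) cnts).length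
        = (pvL alpha_size).toNat ∧
      ∀ j : Nat, j < (pvL alpha_size).toNat →
        (l.foldl (fun cnts idx =>
          (match safe_string_idx x idx with
           | none => cnts
           | some ch =>
             match PySem.List.pyGet? cnts ch with
             | none => cnts
             | some v => (PySem.List.pySet? cnts ch (v + 1)).getD cnts)) cnts).getD j 0
          = cnts.getD j 0 + ((l.filter (pvP x alpha_size j)).length : Int) := by
  induction l with
  | nil => intro cnts hb; simp [hb]
  | cons i l ih =>
    intro cnts hb
    have hgi : pvGood x alpha_size i := hgood i (List.mem_cons_self)
    have hgl : ∀ i ∈ l, pvGood x alpha_size i := fun i hi => hgood i (List.mem_cons_of_mem _ hi)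
    have hstep := pvStepCnt cnts hgi hb
    set j0 := (pvCls x alpha_size i).toNat with hj0
    have hj0lt : j0 < (pvL alpha_size).toNat := by
      have := pvCls_lt x alpha_size i
      have := pvCls_nonneg x alpha_size i
      omega
    have hb' : (cnts.set j0 (cnts.getD j0 0 + 1)).length = (pvL alpha_size).toNat := by
      simp [hb]
    obtain ⟨ihlen, ihget⟩ := ih hgl (cnts.set j0 (cnts.getD j0 0 + 1)) hb'
    simp only [List.foldl_cons, hstep]
    refine ⟨ihlen, ?_⟩
    intro j hj
    rw [ihget j hj]
    have hgd : (cnts.set j0 (cnts.getD j0 0 + 1)).getD j 0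
        = if j0 = j then cnts.getD j0 0 + 1 else cnts.getD j 0 := by
      simp only [List.getD_eq_getElem?_getD, List.getElem?_set]
      rcases eq_or_ne j0 j with he | he
      · subst he; rw [if_pos rfl, if_pos rfl, if_pos (by omega)]; simp
      · rw [if_neg he, if_neg he]
    rw [hgd]
    by_cases he : j0 = j
    · subst he
      have hcl : pvP x alpha_size j0 i = true := by
        have := pvCls_nonneg x alpha_size i
        simp only [pvP, beq_iff_eq]; omega
      simp only [List.filter_cons, hcl, if_true, List.length_cons]
      push_cast; ring
    · have hcl : pvP x alpha_size j i = false := by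
        have := pvCls_nonneg x alpha_size i
        simp only [pvP, beq_eq_false_iff_ne, ne_eq]
        intro hc; apply he; omega
      simp [hcl, he]

-- a list whose entries are characterized pointwise flattens to the corresponding flatMap
theorem pvFlattenEq (m : List (List Int)) (n : Nat) (f : Nat → List Int)
    (hlen : m.length = n) (hget : ∀ j, j < n → m.getD j [] = f j) :
    m.flatten = ((List.range n).map f).flatten := by
  have : m = (List.range n).map f := by
    apply List.ext_getElem
    · simp [hlen]
    · intro j hj _
      have hjn : j < n := by omega
      have := hget j hjn
      simp only [List.getD_eq_getElem?_getD, List.getElem?_eq_getElem hj,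
        Option.getD_some] at this
      simp [this]
  rw [this]

-- a list characterized pointwise IS the corresponding map over range
theorem pvListEq (m : List Int) (n : Nat) (f : Nat → Int)
    (hlen : m.length = n) (hget : ∀ j, j < n → m.getD j 0 = f j) :
    m = (List.range n).map f := by
  apply List.ext_getElem
  · simp [hlen]
  · intro j hj _
    have hjn : j < n := by omega
    have := hget j hjn
    simp only [List.getD_eq_getElem?_getD, List.getElem?_eq_getElem hj,
      Option.getD_some] at this
    simp [this]

-- A's initial bucket list is (alpha_size+1) empty buckets
theorem pvInit (alpha_size : Int) :
    ([([] : List Int)] ++ (PySem.List.pyRange 0 alpha_size 1).map (fun _ => ([] : List Int)))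
      = List.replicate (pvL alpha_size).toNat ([] : List Int) := by
  rw [List.eq_replicate_iff]
  constructor
  · simp [PySem.List.length_pyRange_one, pvL]
    omega
  · intro b hb
    simp at hb
    rcases hb with h | h <;> simp [h]

-- B's offsets loop is a prefix-sum scan
theorem pvScan (l : List Int) :
    ∀ (acc : List Int) (t : Int),
      l.foldl (fun (p : List Int × Int) c => (p.1 ++ [p.2], p.2 + c)) (acc, t)
        = (acc ++ (List.range l.length).map (fun j => t + (l.take j).sum), t + l.sum) := by
  induction l with
  | nil => intro acc t; simp
  | cons c l ih =>
    intro acc t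
    simp only [List.foldl_cons]
    rw [ih (acc ++ [t]) (t + c)]
    simp only [Prod.mk.injEq]
    constructor
    · rw [List.length_cons, List.range_succ_eq_map, List.map_cons, List.map_map,
        List.append_assoc, List.singleton_append]
      congr 1
      congr 1
      · simp
      · apply List.map_congr_left
        intro j _
        simp only [Function.comp_apply, List.take_succ_cons, List.sum_cons]
        ring
    · rw [List.sum_cons]; ring

-- cast of a Nat-valued sum over range
theorem pvCastSum (h : Nat → Nat) (m : Nat) :
    ((List.range m).map (fun j => ((h j : Nat) : Int))).sum
      = (((List.range m).map h).sum : Int) := by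
  induction m with
  | zero => simp
  | succ m ih => simp [List.range_succ, ih]

-- flatten of replicate-segments is one big replicate
theorem pvRepFlat (g : Nat → Nat) (n : Nat) :
    ((List.range n).map (fun j => List.replicate (g j) (0 : Int))).flatten
      = List.replicate (((List.range n).map g).sum) 0 := by
  induction n with
  | zero => simp
  | succ n ih =>
    rw [List.range_succ, List.map_append, List.flatten_append, ih, List.map_append,
      List.sum_append]
    simp only [List.map_cons, List.map_nil, List.flatten_cons, List.flatten_nil,
      List.append_nil, List.sum_cons, List.sum_nil, Nat.add_zero]
    rw [List.replicate_add]

-- set into a map over range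
theorem pvSetMapRange {α : Type} (n c : Nat) (f : Nat → α) (v : α) (_hc : c < n) :
    ((List.range n).map f).set c v
      = (List.range n).map (fun j => if j = c then v else f j) := by
  apply List.ext_getElem
  · simp
  · intro j hj hj'
    have hjn : j < n := by simpa using hj'
    rw [List.getElem_set, List.getElem_map, List.getElem_map, List.getElem_range]
    by_cases he : c = j
    · subst he; simp
    · rw [if_neg he, if_neg (fun hq : j = c => he hq.symm)]

-- set into a flatten, addressed by segment and offset within the segment
theorem pvFlattenSet : ∀ (ss : List (List Int)) (c k : Nat) (v : Int),
    c < ss.length → k < (ss.getD c []).length →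
    ss.flatten.set (((ss.take c).map List.length).sum + k) v
      = (ss.set c ((ss.getD c []).set k v)).flatten := by
  intro ss
  induction ss with
  | nil => intro c k v hc _; simp at hc
  | cons h t ih =>
    intro c k v hc hk
    cases c with
    | zero =>
      simp only [List.getD_cons_zero] at hk
      simp only [List.take_zero, List.map_nil, List.sum_nil, Nat.zero_add,
        List.flatten_cons, List.set_cons_zero, List.getD_cons_zero]
      rw [List.set_append_left _ _ hk]
    | succ c =>
      simp only [List.length_cons, Nat.succ_lt_succ_iff] at hc
      simp only [List.getD_cons_succ] at hk
      simp only [List.take_succ_cons, List.map_cons, List.sum_cons, List.flatten_cons,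
        List.set_cons_succ, List.getD_cons_succ]
      rw [Nat.add_assoc, List.set_append_right _ _ (by omega)]
      rw [Nat.add_sub_cancel_left, ih c k v hc hk]

-- prefix-sum bookkeeping
theorem pvNB_succ (x : List Int) (alpha_size : Int) (s : List Int) (m : Nat) :
    pvNB x alpha_size s (m + 1) = pvNB x alpha_size s m + (pvF x alpha_size s m).length := by
  simp [pvNB, List.range_succ]

theorem pvNB_mono (x : List Int) (alpha_size : Int) (s : List Int) {m n : Nat} (h : m ≤ n) :
    pvNB x alpha_size s m ≤ pvNB x alpha_size s n := by
  induction n with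
  | zero => simp [Nat.le_zero.mp h]
  | succ n ih =>
    by_cases hm : m ≤ n
    · exact le_trans (ih hm) (by rw [pvNB_succ]; omega)
    · have : m = n + 1 := by omega
      subst this; exact le_refl _

-- the invariant state of B's placement loop after processing prefix p of s
def pvSeg (x : List Int) (alpha_size : Int) (s p : List Int) (j : Nat) : List Int :=
  p.filter (pvP x alpha_size j) ++
    List.replicate ((pvF x alpha_size s j).length - (p.filter (pvP x alpha_size j)).length) 0

def pvOut (x : List Int) (alpha_size : Int) (s p : List Int) : List Int :=
  ((List.range (pvL alpha_size).toNat).map (pvSeg x alpha_size s p)).flatten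

def pvOffs (x : List Int) (alpha_size : Int) (s p : List Int) : List Int :=
  (List.range (pvL alpha_size).toNat).map (fun j =>
    ((pvNB x alpha_size s j + (p.filter (pvP x alpha_size j)).length : Nat) : Int))

theorem pvSegLen (x : List Int) (alpha_size : Int) (s p r : List Int) (hs : s = p ++ r) (j : Nat) :
    (pvSeg x alpha_size s p j).length = (pvF x alpha_size s j).length := by
  have hle : (p.filter (pvP x alpha_size j)).length ≤ (pvF x alpha_size s j).length := by
    rw [hs]; simp only [pvF, List.filter_append, List.length_append]; omega
  simp only [pvSeg, List.length_append, List.length_replicate]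
  omega

theorem pvOutLen (x : List Int) (alpha_size : Int) (s p r : List Int) (hs : s = p ++ r) :
    (pvOut x alpha_size s p).length = pvNB x alpha_size s (pvL alpha_size).toNat := by
  simp only [pvOut, List.length_flatten, List.map_map, pvNB]
  congr 1
  apply List.map_congr_left
  intro j _
  exact pvSegLen x alpha_size s p r hs j

-- setting the first padding slot of a segment appends the new element
theorem pvSegSet (done : List Int) (Fn : Nat) (i : Int) (h : done.length < Fn) :
    (done ++ List.replicate (Fn - done.length) (0 : Int)).set done.length i
      = (done ++ [i]) ++ List.replicate (Fn - (done.length + 1)) 0 := by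
  rw [List.set_append_right _ _ (by omega), Nat.sub_self]
  have hq : Fn - done.length = (Fn - (done.length + 1)) + 1 := by omega
  rw [hq, List.replicate_succ, List.set_cons_zero, List.append_assoc, List.singleton_append]

-- one step of B's placement loop advances the invariant by one element
theorem pvStepPlace (x : List Int) (alpha_size : Int) (s p r : List Int) (i : Int)
    (hs : s = p ++ i :: r) (hgi : pvGood x alpha_size i) :
    (match safe_string_idx x i with
     | none => (pvOut x alpha_size s p, pvOffs x alpha_size s p)
     | some ch =>
       match PySem.List.pyGet? (pvOffs x alpha_size s p) ch with
       | none => (pvOut x alpha_size s p, pvOffs x alpha_size s p)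
       | some off =>
         ((PySem.List.pySet? (pvOut x alpha_size s p) off i).getD (pvOut x alpha_size s p),
          (PySem.List.pySet? (pvOffs x alpha_size s p) ch (off + 1)).getD (pvOffs x alpha_size s p)))
      = (pvOut x alpha_size s (p ++ [i]), pvOffs x alpha_size s (p ++ [i])) := by
  have hLn : (0:Int) < pvL alpha_size := pvL_pos alpha_size
  set Ln := (pvL alpha_size).toNat with hLnDef
  set c := (pvCls x alpha_size i).toNat with hc
  have hcLn : c < Ln := by
    have := pvCls_lt x alpha_size i
    have := pvCls_nonneg x alpha_size i
    omega
  have hPc : pvP x alpha_size c i = true := by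
    have := pvCls_nonneg x alpha_size i
    simp only [pvP, beq_iff_eq]; omega
  set k := (p.filter (pvP x alpha_size c)).length with hk
  -- the element's class sublist gains i, so the padding is nonempty
  have hkF : k < (pvF x alpha_size s c).length := by
    rw [hs]; simp only [pvF, List.filter_append, List.length_append, List.filter_cons, hPc]
    simp [hk]
  -- read of offsets[char]
  have hOffsLen : (pvOffs x alpha_size s p).length = Ln := by simp [pvOffs, ← hLnDef]
  have hidx : PySem.List.pyIdx? (pvOffs x alpha_size s p).length (pvChar x i)
      = some c := by rw [hOffsLen]; exact pvIdx_eq hLnDef hgi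
  set M := pvNB x alpha_size s c + k with hM
  have hget : (pvOffs x alpha_size s p)[c]? = some ((M : Nat) : Int) := by
    rw [pvOffs, ← hLnDef, List.getElem?_map, List.getElem?_range hcLn]
    simp [hM, hk]
  -- bounds for the write position
  have hMlt : M < pvNB x alpha_size s Ln := by
    have h1 : pvNB x alpha_size s c + (pvF x alpha_size s c).length
        = pvNB x alpha_size s (c + 1) := (pvNB_succ x alpha_size s c).symm
    have h2 : pvNB x alpha_size s (c + 1) ≤ pvNB x alpha_size s Ln :=
      pvNB_mono x alpha_size s hcLn
    omega
  have hOutLen : (pvOut x alpha_size s p).length = pvNB x alpha_size s Ln := by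
    rw [pvOutLen x alpha_size s p (i :: r) hs, hLnDef]
  have hset : PySem.List.pySet? (pvOut x alpha_size s p) ((M : Nat) : Int) i
      = some ((pvOut x alpha_size s p).set M i) :=
    PySem.List.pySet?_natCast _ _ _ (by omega)
  -- the written output equals the advanced segment picture
  have hsegget : ((List.range Ln).map (pvSeg x alpha_size s p)).getD c []
      = pvSeg x alpha_size s p c := by
    rw [List.getD_eq_getElem?_getD, List.getElem?_map, List.getElem?_range hcLn]
    rfl
  have htake : ((((List.range Ln).map (pvSeg x alpha_size s p)).take c).map List.length).sum
      = pvNB x alpha_size s c := by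
    rw [← List.map_take, List.take_range, Nat.min_eq_left (by omega), List.map_map, pvNB]
    congr 1
    apply List.map_congr_left
    intro j _
    exact pvSegLen x alpha_size s p (i :: r) hs j
  have hfil : List.filter (pvP x alpha_size c) (p ++ [i])
      = List.filter (pvP x alpha_size c) p ++ [i] := by
    rw [List.filter_append, List.filter_cons, hPc]
    simp
  have hsegset : (pvSeg x alpha_size s p c).set k i = pvSeg x alpha_size s (p ++ [i]) c := by
    simp only [pvSeg, hfil, List.length_append, List.length_cons, List.length_nil,
      Nat.zero_add]
    rw [hk]
    exact pvSegSet _ _ _ (by omega)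
  have houtset : (pvOut x alpha_size s p).set M i = pvOut x alpha_size s (p ++ [i]) := by
    have hkseg : k < (((List.range Ln).map (pvSeg x alpha_size s p)).getD c []).length := by
      rw [hsegget, pvSegLen x alpha_size s p (i :: r) hs c]; omega
    have hfs := pvFlattenSet ((List.range Ln).map (pvSeg x alpha_size s p)) c k i
      (by simp [hcLn]) hkseg
    rw [htake, hsegget, hsegset, pvSetMapRange Ln c _ _ hcLn] at hfs
    show ((List.range Ln).map (pvSeg x alpha_size s p)).flatten.set M i
        = ((List.range Ln).map (pvSeg x alpha_size s (p ++ [i]))).flatten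
    rw [hM, hfs]
    congr 1
    apply List.map_congr_left
    intro j _
    by_cases hj : j = c
    · subst hj; simp
    · rw [if_neg hj]
      have hPj : pvP x alpha_size j i = false := by
        have := pvCls_nonneg x alpha_size i
        simp only [pvP, beq_eq_false_iff_ne, ne_eq]
        intro hq; apply hj; omega
      simp only [pvSeg, List.filter_append, List.filter_cons, hPj]
      simp
  -- the offsets update equals the advanced offsets picture
  have hoffset : PySem.List.pySet? (pvOffs x alpha_size s p) (pvChar x i) (((M : Nat) : Int) + 1)
      = some (pvOffs x alpha_size s (p ++ [i])) := by
    have hsetn : PySem.List.pySet? (pvOffs x alpha_size s p) (pvChar x i) (((M : Nat) : Int) + 1)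
        = ((PySem.List.pyIdx? (pvOffs x alpha_size s p).length (pvChar x i)).map
            (fun n => (pvOffs x alpha_size s p).set n (((M : Nat) : Int) + 1))) := by
      simp [PySem.List.pySet?]
    rw [hsetn, hidx, Option.map_some]
    congr 1
    rw [pvOffs, ← hLnDef, pvSetMapRange Ln c _ _ hcLn, pvOffs, ← hLnDef]
    apply List.map_congr_left
    intro j _
    by_cases hj : j = c
    · subst hj
      rw [if_pos rfl, hfil]
      simp only [List.length_append, List.length_cons, List.length_nil]
      push_cast [hM, hk]
      ring
    · rw [if_neg hj]
      have hPj : pvP x alpha_size j i = false := by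
        have := pvCls_nonneg x alpha_size i
        simp only [pvP, beq_eq_false_iff_ne, ne_eq]
        intro hq; apply hj; omega
      rw [List.filter_append, List.filter_cons, hPj]
      simp
  rw [hgi.1]
  simp only [PySem.List.pyGet?, hidx, Option.bind_some, hget]
  rw [hset]
  simp only [Option.getD_some]
  rw [houtset, hoffset]
  simp only [Option.getD_some]

-- B's placement loop carried to completion
theorem pvFoldPlace (x : List Int) (alpha_size : Int) (s : List Int)
    (hgood : ∀ i ∈ s, pvGood x alpha_size i) :
    ∀ (r p : List Int), s = p ++ r →
      r.foldl (fun (st : List Int × List Int) idx =>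
        match safe_string_idx x idx with
        | none => st
        | some ch =>
          match PySem.List.pyGet? st.2 ch with
          | none => st
          | some off =>
            ((PySem.List.pySet? st.1 off idx).getD st.1,
             (PySem.List.pySet? st.2 ch (off + 1)).getD st.2))
        (pvOut x alpha_size s p, pvOffs x alpha_size s p)
      = (pvOut x alpha_size s s, pvOffs x alpha_size s s) := by
  intro r
  induction r with
  | nil =>
    intro p hp
    rw [List.append_nil] at hp
    subst hp
    rfl
  | cons i r ih =>
    intro p hp
    have hgi : pvGood x alpha_size i := hgood i (by rw [hp]; simp)
    have hstep := pvStepPlace x alpha_size s p r i hp hgi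
    simp only [List.foldl_cons, hstep]
    exact ih (p ++ [i]) (by rw [hp]; simp)

-- flatten of all-empty buckets
theorem pvFlattenRepNil : ∀ n : Nat, (List.replicate n ([] : List Int)).flatten = [] := by
  intro n
  induction n with
  | zero => rfl
  | succ n ih => simp [List.replicate_succ, ih]

-- ===== VERDICT (by name: the statement is the Claim_ definition above) =====
theorem bucket_sort_first_char_spec : Claim_equal_bucket_sort_first_char := by
  intro x s alpha_size _hdom hpre
  unfold Spec_bucket_sort_first_char
  have hpre' := hpre
  unfold Pre_bucket_sort_first_char at hpre'
  rw [Bool.and_eq_true, Bool.or_eq_true] at hpre'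
  rcases hpre'.1 with hα | hemp
  case inr =>
    -- empty suffix list (covers alpha_size < 0): both sides return []
    have hs : s = [] := List.isEmpty_iff.mp hemp
    subst hs
    have hA : bucket_sort_first_char x [] alpha_size
        = ([([] : List Int)] ++ (PySem.List.pyRange 0 alpha_size 1).map
            (fun _ => ([] : List Int))).flatten := rfl
    rw [hA, pvInit, pvFlattenRepNil]
    have hB : bucket_sort_first_char_alt x [] alpha_size
        = (PySem.List.pyRepeat [(0 : Int)]
            (((PySem.List.pyRepeat [(0 : Int)] (alpha_size + 1)).foldl
              (fun (p : List Int × Int) c => (p.1 ++ [p.2], p.2 + c))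
              (([] : List Int), (0 : Int))).2)) := rfl
    rw [hB, PySem.List.pyRepeat_singleton, pvScan]
    simp [List.sum_replicate, PySem.List.pyRepeat_singleton]
  case inl =>
    have hα : 0 ≤ alpha_size := of_decide_eq_true hα
    set Ln := (pvL alpha_size).toNat with hLn
    have hLα : pvL alpha_size = alpha_size + 1 := by unfold pvL; omega
    have hgood : ∀ i ∈ s, pvGood x alpha_size i := fun i hi => pvGood_of_pre hα hpre hi
    -- A's result: the per-class sublists, in class order
    have hA : bucket_sort_first_char x s alpha_size
        = ((List.range Ln).map (pvF x alpha_size s)).flatten := by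
      have hb : ([([] : List Int)] ++ (PySem.List.pyRange 0 alpha_size 1).map
          (fun _ => ([] : List Int))).length = Ln := by
        rw [pvInit, hLn]; simp
      obtain ⟨hlen, hget⟩ := pvFoldA s hgood _ hb
      have hA0 : bucket_sort_first_char x s alpha_size
          = (s.foldl (fun b idx =>
              (match safe_string_idx x idx with
               | none => b
               | some char =>
                 match PySem.List.pyGet? b char with
                 | none => b
                 | some bl => (PySem.List.pySet? b char (bl ++ [idx])).getD b))
              ([([] : List Int)] ++ (PySem.List.pyRange 0 alpha_size 1).map
                (fun _ => ([] : List Int)))).flatten := rfl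
      rw [hA0]
      apply pvFlattenEq _ Ln (pvF x alpha_size s) (by rw [hlen, hLn])
      intro j hj
      rw [hget j hj, pvInit]
      simp [pvF]
    -- B, unfolded (lets expanded)
    have hB : bucket_sort_first_char_alt x s alpha_size
        = (s.foldl (fun (st : List Int × List Int) idx =>
            match safe_string_idx x idx with
            | none => st
            | some ch =>
              match PySem.List.pyGet? st.2 ch with
              | none => st
              | some off =>
                ((PySem.List.pySet? st.1 off idx).getD st.1,
                 (PySem.List.pySet? st.2 ch (off + 1)).getD st.2))
            (PySem.List.pyRepeat [(0 : Int)]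
              (((s.foldl (fun cnts idx =>
                  match safe_string_idx x idx with
                  | none => cnts
                  | some ch =>
                    match PySem.List.pyGet? cnts ch with
                    | none => cnts
                    | some v => (PySem.List.pySet? cnts ch (v + 1)).getD cnts)
                  (PySem.List.pyRepeat [(0 : Int)] (alpha_size + 1))).foldl
                (fun (p : List Int × Int) c => (p.1 ++ [p.2], p.2 + c))
                (([] : List Int), (0 : Int))).2),
             ((s.foldl (fun cnts idx =>
                  match safe_string_idx x idx with
                  | none => cnts
                  | some ch =>
                    match PySem.List.pyGet? cnts ch with
                    | none => cnts
                    | some v => (PySem.List.pySet? cnts ch (v + 1)).getD cnts)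
                  (PySem.List.pyRepeat [(0 : Int)] (alpha_size + 1))).foldl
                (fun (p : List Int × Int) c => (p.1 ++ [p.2], p.2 + c))
                (([] : List Int), (0 : Int))).1)).1 := rfl
    -- the initial counts array
    have hcnt0 : PySem.List.pyRepeat [(0 : Int)] (alpha_size + 1) = List.replicate Ln 0 := by
      rw [PySem.List.pyRepeat_singleton]
      congr 1
      omega
    -- the counts loop computes the class counts
    have hcounts : (s.foldl (fun cnts idx =>
          match safe_string_idx x idx with
          | none => cnts
          | some ch =>
            match PySem.List.pyGet? cnts ch with
            | none => cnts
            | some v => (PySem.List.pySet? cnts ch (v + 1)).getD cnts)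
          (List.replicate Ln (0 : Int)))
        = (List.range Ln).map (fun j => ((pvF x alpha_size s j).length : Int)) := by
      obtain ⟨hlen, hget⟩ := pvFoldCnt s hgood (List.replicate Ln (0 : Int)) (by rw [hLn]; simp)
      apply pvListEq _ Ln _ (by rw [hlen, hLn])
      intro j hj
      rw [hget j hj]
      simp [pvF]
    -- the offsets loop computes the prefix sums
    have hoffs0 : ((List.nil : List Int) ++
          (List.range ((List.range Ln).map
              (fun j => ((pvF x alpha_size s j).length : Int))).length).map
            (fun j => 0 + (((List.range Ln).map
              (fun j => ((pvF x alpha_size s j).length : Int))).take j).sum))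
        = pvOffs x alpha_size s [] := by
      simp only [List.nil_append, List.length_map, List.length_range]
      rw [pvOffs, ← hLn]
      apply List.map_congr_left
      intro j hj
      rw [List.mem_range] at hj
      rw [← List.map_take, List.take_range, Nat.min_eq_left (le_of_lt hj),
        pvCastSum (fun j => (pvF x alpha_size s j).length) j]
      simp only [pvNB, List.filter_nil, List.length_nil, Nat.add_zero]
      push_cast
      ring
    -- the output array starts as one block of zeros per class
    have hseg0 : ∀ j, pvSeg x alpha_size s [] j
        = List.replicate (pvF x alpha_size s j).length 0 := by
      intro j; simp [pvSeg]
    have hout0 : PySem.List.pyRepeat [(0 : Int)]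
          (0 + ((List.range Ln).map (fun j => ((pvF x alpha_size s j).length : Int))).sum)
        = pvOut x alpha_size s [] := by
      rw [PySem.List.pyRepeat_singleton,
        pvCastSum (fun j => (pvF x alpha_size s j).length) Ln]
      rw [pvOut, ← hLn, List.map_congr_left (fun j _ => hseg0 j), pvRepFlat]
      congr 1
      omega
    -- the completed output equals the per-class sublists laid end to end
    have hfin : pvOut x alpha_size s s = ((List.range Ln).map (pvF x alpha_size s)).flatten := by
      rw [pvOut, ← hLn]
      congr 1
      apply List.map_congr_left
      intro j _
      simp [pvSeg, pvF]
    rw [hA, hB, hcnt0, hcounts,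
      pvScan ((List.range Ln).map (fun j => ((pvF x alpha_size s j).length : Int))) [] 0]
    rw [hoffs0, hout0, pvFoldPlace x alpha_size s hgood s [] (by simp)]
    rw [hfin]
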